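-- pv_equiv track=rewrite | github.com/joaocmd/CubiCasa5k | floortrans/metrics_points.py | update_one
-- ===== SOURCE A (Python) =====
-- import itertools
--
-- def sqrdistance(p, q):
--     return (p[0] - q[0])**2 + (p[1] - q[1])**2
--
-- def point(p):
--     return (p[0], p[1])
--
-- def update_one(gt, predicted, distance_threshold, values):
--     all_predicted = predicted[-1]
--     all_gt = []
--     for k in gt:
--         all_gt += [[val[0], val[1], k] for val in gt[k]]
--
--     pairs = itertools.product(all_predicted, all_gt)
--     pairs = ([pair, sqrdistance(pair[0], pair[1])] for pair in pairs)
--     pairs = (x for x in pairs if x[1] < distance_threshold)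
--     pairs = sorted(pairs, key=lambda p: p[1])
--     pairs = [[point(p[0][0]), point(p[0][1])] for p in pairs]
--
--     values[2] += len(all_gt)
--     points = set(point(p) for p in all_predicted)
--     while len(pairs) != 0 and len(points) != 0:
--         closest = pairs[0] # it is sorted already
--
--         values[0] += 1
--         points.remove(closest[0]) # first is the predicted (from cartesian product)
--         pairs = [p for p in pairs if p[0] != closest[0] and p[1] != closest[1]]
--
--     values[1] += len(points)
--
--     return values
-- ===== SOURCE B (Python) =====
-- def sqrdistance(p, q):
--     return (p[0] - q[0])**2 + (p[1] - q[1])**2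
--
-- def update_one(gt, predicted, distance_threshold, values):
--     # Same return value as A; like A, mutates `values` in place.
--     all_predicted = predicted[-1]
--     gt_points = [(v[0], v[1]) for k in gt for v in gt[k]]
--     cand = [((p[0], p[1]), q, sqrdistance(p, q))
--             for p in all_predicted for q in gt_points]
--     cand = sorted((c for c in cand if c[2] < distance_threshold), key=lambda c: c[2])
--     used_p, used_g = set(), set()
--     matches = 0
--     for pp, gp, _ in cand:
--         if pp not in used_p and gp not in used_g:
--             matches += 1
--             used_p.add(pp)
--             used_g.add(gp)
--     values[0] += matches
--     values[1] += len(set((p[0], p[1]) for p in all_predicted)) - matches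
--     values[2] += len(gt_points)
--     return values
-- ===== Notes on version B (the rewrite author's own statement) =====
-- stated objective: faster
-- what changed: A rebuilds (filters) the whole sorted candidate-pair list after every accepted match; B sorts the candidate pairs once and does a single greedy pass that skips pairs whose predicted or ground-truth endpoint is already used (hash sets), computing the unmatched count arithmetically instead of maintaining the shrinking point set.
import Mathlib
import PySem

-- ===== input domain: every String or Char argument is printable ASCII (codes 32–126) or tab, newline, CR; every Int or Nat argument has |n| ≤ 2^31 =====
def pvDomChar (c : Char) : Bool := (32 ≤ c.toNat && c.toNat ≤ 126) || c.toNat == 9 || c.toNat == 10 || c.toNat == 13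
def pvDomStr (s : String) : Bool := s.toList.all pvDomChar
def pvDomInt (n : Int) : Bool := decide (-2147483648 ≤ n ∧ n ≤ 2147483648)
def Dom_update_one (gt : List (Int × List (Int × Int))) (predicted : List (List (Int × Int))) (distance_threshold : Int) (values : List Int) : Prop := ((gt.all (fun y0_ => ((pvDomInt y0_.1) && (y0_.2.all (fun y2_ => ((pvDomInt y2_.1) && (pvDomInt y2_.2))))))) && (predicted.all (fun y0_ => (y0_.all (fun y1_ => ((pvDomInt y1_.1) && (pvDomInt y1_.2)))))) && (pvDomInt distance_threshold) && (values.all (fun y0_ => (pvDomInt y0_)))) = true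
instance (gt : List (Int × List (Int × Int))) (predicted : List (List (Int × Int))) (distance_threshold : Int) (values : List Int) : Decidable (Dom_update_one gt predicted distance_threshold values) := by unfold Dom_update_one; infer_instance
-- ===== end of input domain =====

-- B replaces A's quadratic rematch loop (re-filtering the whole sorted pair list after every match)
-- by one greedy pass over the sorted candidates that skips already-used endpoints via sets; return
-- values agree (like A, the Python B mutates `values` in place — the equivalence is about the return value).


-- ===== PORT A =====
-- sqrdistance(p, q) on two points
def pvSqrdist (p q : Int × Int) : Int := (p.1 - q.1)^2 + (p.2 - q.2)^2

-- sqrdistance(pair[0], pair[1]) where pair[1] is an all_gt entry [x, y, k] (only [0] and [1] are read)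
def pvSqrdist3 (p : Int × Int) (q : Int × Int × Int) : Int := (p.1 - q.1)^2 + (p.2 - q.2.1)^2

-- A's while loop: take the head of the (sorted) pair list, count a match, remove its predicted
-- point from `points` and drop every pair sharing either endpoint.
def pvLoopA (pairs : List ((Int × Int) × (Int × Int))) (points : PySem.Set (Int × Int)) (v0 : Int) :
    PySem.Set (Int × Int) × Int :=
  match pairs with
  | [] => (points, v0)
  | closest :: rest =>
    if PySem.Set.len points = 0 then (points, v0)
    else
      match PySem.Set.remove? points closest.1 with
      | none => (points, v0)  -- unreachable: the predicted endpoint of a pair is always in `points`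
      | some points' =>
          pvLoopA ((closest :: rest).filter (fun p => p.1 != closest.1 && p.2 != closest.2))
            points' (v0 + 1)
termination_by pairs.length
decreasing_by
  simp only [List.filter_cons, bne_self_eq_false, Bool.false_and, if_neg Bool.false_ne_true,
    List.length_cons]
  exact Nat.lt_succ_of_le (List.length_filter_le _ rest)

def update_one (gt : List (Int × List (Int × Int))) (predicted : List (List (Int × Int))) (distance_threshold : Int) (values : List Int) : List Int :=
  match predicted.getLast? with
  | none => []  -- Python raises IndexError on predicted[-1]; excluded by Pre_
  | some all_predicted =>
    let d := PySem.Dict.mk gt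
    let all_gt : List (Int × Int × Int) :=
      d.keys.foldl (fun acc k => acc ++ (d.getD k []).map (fun val => (val.1, val.2, k))) []
    let pairs0 := all_predicted.flatMap (fun p => all_gt.map (fun q => (p, q)))  -- itertools.product
    let pairs1 := pairs0.map (fun pr => (pr, pvSqrdist3 pr.1 pr.2))
    let pairs2 := pairs1.filter (fun x => decide (x.2 < distance_threshold))
    let pairs3 := PySem.List.sorted pairs2 (fun x => x.2) false
    let pairs := pairs3.map (fun x => (x.1.1, (x.1.2.1, x.1.2.2.1)))
    -- values[2] += len(all_gt); indices 0..2 are in range under Pre_ (Python raises IndexError otherwise)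
    let values1 := values.set 2 (PySem.List.pyGetD values 2 0 + (all_gt.length : Int))
    let points : PySem.Set (Int × Int) := PySem.Set.ofList all_predicted
    let res := pvLoopA pairs points (PySem.List.pyGetD values1 0 0)
    let values2 := values1.set 0 res.2
    values2.set 1 (PySem.List.pyGetD values2 1 0 + PySem.Set.len res.1)

-- ===== PORT B =====
-- B's single greedy pass: scan the sorted candidates once, skipping used endpoints.
def pvLoopB (cand : List ((Int × Int) × (Int × Int) × Int)) (usedP usedG : PySem.Set (Int × Int)) (m : Int) : Int :=
  match cand with
  | [] => m
  | (pp, gp, _) :: rest =>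
    if !(PySem.Set.contains usedP pp) && !(PySem.Set.contains usedG gp) then
      pvLoopB rest (PySem.Set.add usedP pp) (PySem.Set.add usedG gp) (m + 1)
    else pvLoopB rest usedP usedG m

def update_one_alt (gt : List (Int × List (Int × Int))) (predicted : List (List (Int × Int))) (distance_threshold : Int) (values : List Int) : List Int :=
  match predicted.getLast? with
  | none => []  -- Python raises IndexError on predicted[-1]; excluded by Pre_
  | some all_predicted =>
    let d := PySem.Dict.mk gt
    let gt_points : List (Int × Int) :=
      d.keys.flatMap (fun k => (d.getD k []).map (fun v => (v.1, v.2)))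
    let cand0 := all_predicted.flatMap (fun p => gt_points.map (fun q => (p, q, pvSqrdist p q)))
    let cand := PySem.List.sorted (cand0.filter (fun c => decide (c.2.2 < distance_threshold)))
      (fun c => c.2.2) false
    let nmatch := pvLoopB cand PySem.Set.empty PySem.Set.empty 0
    let distinct := PySem.Set.len (PySem.Set.ofList all_predicted)
    let values1 := values.set 0 (PySem.List.pyGetD values 0 0 + nmatch)
    let values2 := values1.set 1 (PySem.List.pyGetD values1 1 0 + (distinct - nmatch))
    values2.set 2 (PySem.List.pyGetD values2 2 0 + (gt_points.length : Int))

-- ===== PRECONDITION & SPEC =====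
-- Pre_ excludes exactly: empty `predicted` and `values` shorter than 3, on which the Python A raises
-- IndexError; and duplicate keys in `gt`, which a Python dict cannot carry (the assoc-list corner has
-- no Python counterpart).
def Pre_update_one (gt : List (Int × List (Int × Int))) (predicted : List (List (Int × Int))) (distance_threshold : Int) (values : List Int) : Prop :=
  predicted ≠ [] ∧ 3 ≤ values.length ∧ (gt.map Prod.fst).Nodup
instance (gt : List (Int × List (Int × Int))) (predicted : List (List (Int × Int))) (distance_threshold : Int) (values : List Int) : Decidable (Pre_update_one gt predicted distance_threshold values) := by unfold Pre_update_one; infer_instance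

def pvWitness_update_one : (List (Int × List (Int × Int))) × (List (List (Int × Int))) × Int × List Int :=
  ([(0, [(0, 0)])], [[(0, 0)]], 5, [0, 0, 0])

def Spec_update_one (gt : List (Int × List (Int × Int))) (predicted : List (List (Int × Int))) (distance_threshold : Int) (values : List Int) (out : List Int) : Prop := out = update_one_alt gt predicted distance_threshold values
instance (gt : List (Int × List (Int × Int))) (predicted : List (List (Int × Int))) (distance_threshold : Int) (values : List Int) (out : List Int) : Decidable (Spec_update_one gt predicted distance_threshold values out) := by unfold Spec_update_one; infer_instance

-- ===== CLAIM (what is proved, stated in full; the proofs are below) =====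
def Claim_equal_update_one : Prop := ∀ (gt : List (Int × List (Int × Int))) (predicted : List (List (Int × Int))) (distance_threshold : Int) (values : List Int), Dom_update_one gt predicted distance_threshold values → Pre_update_one gt predicted distance_threshold values → Spec_update_one gt predicted distance_threshold values (update_one gt predicted distance_threshold values)

-- ===== LEMMAS AND PROOFS =====

-- the projection from a B-candidate (pp, gp, d) to an A-pair (pp, gp)
def pvPi (c : (Int × Int) × (Int × Int) × Int) : (Int × Int) × (Int × Int) := (c.1, c.2.1)

lemma pv_insertBy_map {α β : Type} (f : α → β) (bef : α → α → Bool) (bef' : β → β → Bool)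
    (h : ∀ a b, bef' (f a) (f b) = bef a b) (x : α) (ys : List α) :
    PySem.List.insertBy bef' (f x) (ys.map f) = (PySem.List.insertBy bef x ys).map f := by
  induction ys with
  | nil => simp [PySem.List.insertBy]
  | cons y ys ih =>
      simp only [List.map_cons, PySem.List.insertBy, h]
      split <;> simp [ih]

lemma pv_sorted_map {α β : Type} (f : α → β) (key : β → Int) (xs : List α) :
    PySem.List.sorted (xs.map f) key false
      = (PySem.List.sorted xs (fun a => key (f a)) false).map f := by
  rw [PySem.List.sorted_eq_foldl_insertBy, PySem.List.sorted_eq_foldl_insertBy]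
  suffices h : ∀ acc : List α,
      (xs.map f).foldl (fun acc x => PySem.List.insertBy (fun a b => decide (key a < key b)) x acc)
        (acc.map f)
      = (xs.foldl (fun acc x =>
          PySem.List.insertBy (fun a b => decide (key (f a) < key (f b))) x acc) acc).map f by
    simpa using h []
  induction xs with
  | nil => intro acc; simp
  | cons x xs ih =>
      intro acc
      simp only [List.map_cons, List.foldl_cons]
      rw [pv_insertBy_map f _ _ (fun a b => rfl) x acc, ih]

-- pvLoopB shifts its accumulator
lemma pv_loopB_acc (cand : List ((Int × Int) × (Int × Int) × Int)) :
    ∀ (u g : PySem.Set (Int × Int)) (m : Int),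
      pvLoopB cand u g m = m + pvLoopB cand u g 0 := by
  induction cand with
  | nil => intro u g m; simp [pvLoopB]
  | cons c rest ih =>
      intro u g m
      obtain ⟨pp, gp, dd⟩ := c
      simp only [pvLoopB]
      split
      · rw [ih _ _ (m + 1), ih _ _ (0 + 1)]; ring
      · rw [ih u g m]

-- length of a discard of a present element of a Nodup list
lemma pv_length_discard {x : Int × Int} {s : List (Int × Int)} (hm : x ∈ s) (hn : s.Nodup) :
    (PySem.Set.discard s x).length + 1 = s.length := by
  induction s with
  | nil => cases hm
  | cons a s ih =>
      rw [List.nodup_cons] at hn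
      by_cases hax : a = x
      · subst hax
        have hf : List.filter (fun y => !(y == a)) s = s := by
          apply List.filter_eq_self.mpr
          intro y hy
          simp only [Bool.not_eq_eq_eq_not, Bool.not_true, beq_eq_false_iff_ne, ne_eq]
          rintro rfl
          exact hn.1 hy
        simp [PySem.Set.discard, hf]
      · rcases List.mem_cons.mp hm with h | h
        · exact absurd h.symm hax
        · have hrec := ih h hn.2
          simp only [PySem.Set.discard, List.filter_cons] at hrec ⊢
          have : ((a == x) = false) := beq_eq_false_iff_ne.mpr hax
          simp [this] at *
          omega

-- MAIN INVARIANT: A's destructive loop on the still-live pairs equals B's skip-scan.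
lemma pv_main (cand : List ((Int × Int) × (Int × Int) × Int)) :
    ∀ (u g : PySem.Set (Int × Int)) (points : PySem.Set (Int × Int)) (v0 : Int),
      points.Nodup →
      (∀ c ∈ cand, c.1 ∉ u → c.2.1 ∉ g → c.1 ∈ points) →
      (pvLoopA ((cand.map pvPi).filter
          (fun x => !(PySem.Set.contains u x.1) && !(PySem.Set.contains g x.2))) points v0).2
        = v0 + pvLoopB cand u g 0
      ∧ (((pvLoopA ((cand.map pvPi).filter
          (fun x => !(PySem.Set.contains u x.1) && !(PySem.Set.contains g x.2))) points v0).1.length : Int)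
        = (points.length : Int) - pvLoopB cand u g 0) := by
  induction cand with
  | nil => intro u g points v0 _ _; simp [pvLoopA, pvLoopB]
  | cons c rest ih =>
      intro u g points v0 hnd hinv
      obtain ⟨pp, gp, dd⟩ := c
      by_cases hu : pp ∈ u
      · -- head skipped: predicted endpoint already used
        have hcu : PySem.Set.contains u pp = true := (PySem.Set.contains_iff u pp).mpr hu
        have hfc : ((((pp, gp, dd) :: rest).map pvPi).filter
            (fun x => !(PySem.Set.contains u x.1) && !(PySem.Set.contains g x.2)))
            = ((rest.map pvPi).filter
            (fun x => !(PySem.Set.contains u x.1) && !(PySem.Set.contains g x.2))) := by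
          simp [pvPi, hu]
        rw [hfc]
        have hB : pvLoopB ((pp, gp, dd) :: rest) u g 0 = pvLoopB rest u g 0 := by
          simp [pvLoopB, hu]
        rw [hB]
        exact ih u g points v0 hnd (fun c hc h1 h2 => hinv c (List.mem_cons_of_mem _ hc) h1 h2)
      · by_cases hg : gp ∈ g
        · -- head skipped: gt endpoint already used
          have hcg : PySem.Set.contains g gp = true := (PySem.Set.contains_iff g gp).mpr hg
          have hfc : ((((pp, gp, dd) :: rest).map pvPi).filter
              (fun x => !(PySem.Set.contains u x.1) && !(PySem.Set.contains g x.2)))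
              = ((rest.map pvPi).filter
              (fun x => !(PySem.Set.contains u x.1) && !(PySem.Set.contains g x.2))) := by
            simp [pvPi, hg]
          rw [hfc]
          have hB : pvLoopB ((pp, gp, dd) :: rest) u g 0 = pvLoopB rest u g 0 := by
            simp [pvLoopB, hg]
          rw [hB]
          exact ih u g points v0 hnd (fun c hc h1 h2 => hinv c (List.mem_cons_of_mem _ hc) h1 h2)
        · -- head is live: A matches it, B counts it
          have hcu : PySem.Set.contains u pp = false := by
            rw [Bool.eq_false_iff]; intro h; exact hu ((PySem.Set.contains_iff u pp).mp h)
          have hcg : PySem.Set.contains g gp = false := by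
            rw [Bool.eq_false_iff]; intro h; exact hg ((PySem.Set.contains_iff g gp).mp h)
          have hmemp : pp ∈ points := hinv (pp, gp, dd) List.mem_cons_self hu hg
          have hcp : PySem.Set.contains points pp = true := (PySem.Set.contains_iff points pp).mpr hmemp
          have hfc : ((((pp, gp, dd) :: rest).map pvPi).filter
              (fun x => !(PySem.Set.contains u x.1) && !(PySem.Set.contains g x.2)))
              = (pp, gp) :: ((rest.map pvPi).filter
              (fun x => !(PySem.Set.contains u x.1) && !(PySem.Set.contains g x.2))) := by
            simp [pvPi, hu, hg]
          rw [hfc]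
          -- unfold one step of pvLoopA
          have hlen0 : ¬ (PySem.Set.len points = 0) := by
            simp only [PySem.Set.len]
            have : points ≠ [] := List.ne_nil_of_mem hmemp
            simp [List.length_eq_zero_iff, this]
          have hstep : pvLoopA ((pp, gp) :: ((rest.map pvPi).filter
                (fun x => !(PySem.Set.contains u x.1) && !(PySem.Set.contains g x.2)))) points v0
              = pvLoopA ((((pp, gp) :: ((rest.map pvPi).filter
                  (fun x => !(PySem.Set.contains u x.1) && !(PySem.Set.contains g x.2)))).filter
                  (fun p => p.1 != pp && p.2 != gp)))
                (PySem.Set.discard points pp) (v0 + 1) := by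
            rw [pvLoopA]
            simp only [hlen0, if_false, PySem.Set.remove?, hcp, if_pos]
          rw [hstep]
          -- the re-filter is the live filter for the enlarged used-sets
          have hff : (((pp, gp) :: ((rest.map pvPi).filter
                (fun x => !(PySem.Set.contains u x.1) && !(PySem.Set.contains g x.2)))).filter
                (fun p => p.1 != pp && p.2 != gp))
              = ((rest.map pvPi).filter
                (fun x => !(PySem.Set.contains (PySem.Set.add u pp) x.1)
                  && !(PySem.Set.contains (PySem.Set.add g gp) x.2))) := by
            rw [List.filter_cons_of_neg (by simp), List.filter_filter]
            apply List.filter_congr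
            intro x _
            rw [PySem.Set.add_of_not_mem hu, PySem.Set.add_of_not_mem hg]
            simp only [PySem.Set.contains, List.contains_append, Bool.not_or, bne,
              List.contains_cons, List.contains_nil, Bool.or_false]
            by_cases h1 : x.1 = pp <;> by_cases h2 : x.2 = gp <;>
              simp [h1, h2, Bool.and_assoc, Bool.and_comm, Bool.and_left_comm]
          rw [hff]
          have hB : pvLoopB ((pp, gp, dd) :: rest) u g 0
              = 1 + pvLoopB rest (PySem.Set.add u pp) (PySem.Set.add g gp) 0 := by
            rw [pvLoopB]
            simp only [hcu, hcg, Bool.not_false, Bool.and_self, if_pos]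
            rw [pv_loopB_acc]
            ring
          rw [hB]
          have hinv' : ∀ c ∈ rest, c.1 ∉ PySem.Set.add u pp → c.2.1 ∉ PySem.Set.add g gp →
              c.1 ∈ PySem.Set.discard points pp := by
            intro c hc h1 h2
            rw [PySem.Set.mem_add] at h1 h2
            push_neg at h1 h2
            exact (PySem.Set.mem_discard points pp c.1).mpr
              ⟨hinv c (List.mem_cons_of_mem _ hc) h1.1 h2.1, h1.2⟩
          obtain ⟨ih1, ih2⟩ := ih (PySem.Set.add u pp) (PySem.Set.add g gp)
            (PySem.Set.discard points pp) (v0 + 1) (PySem.Set.nodup_discard points pp hnd) hinv'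
          have hlen : (PySem.Set.discard points pp).length + 1 = points.length :=
            pv_length_discard hmemp hnd
          constructor
          · rw [ih1]; ring
          · rw [ih2]
            have : ((PySem.Set.discard points pp).length : Int) = (points.length : Int) - 1 := by
              omega
            rw [this]; ring

-- the two candidate pipelines produce the same sorted list up to pvPi, and candidates' predicted
-- endpoints come from all_predicted
lemma pv_pairs_eq (ap : List (Int × Int)) (AG : List (Int × Int × Int)) (dt : Int) :
    (PySem.List.sorted
        (((ap.flatMap (fun p => AG.map (fun q => (p, q)))).map
            (fun pr => (pr, pvSqrdist3 pr.1 pr.2))).filter (fun x => decide (x.2 < dt)))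
        (fun x => x.2) false).map (fun x => (x.1.1, (x.1.2.1, x.1.2.2.1)))
      = (PySem.List.sorted
          (((ap.flatMap (fun p => (AG.map (fun q => (q.1, q.2.1))).map
              (fun q => (p, q, pvSqrdist p q))))).filter (fun c => decide (c.2.2 < dt)))
          (fun c => c.2.2) false).map pvPi := by
  have h0 : (ap.flatMap (fun p => (AG.map (fun q => (q.1, q.2.1))).map
        (fun q => (p, q, pvSqrdist p q))))
      = ((ap.flatMap (fun p => AG.map (fun q => (p, q)))).map
          (fun pr => (pr, pvSqrdist3 pr.1 pr.2))).map
          (fun x => (x.1.1, (x.1.2.1, x.1.2.2.1), x.2)) := by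
    simp [List.map_flatMap, List.map_map, Function.comp_def, pvSqrdist, pvSqrdist3]
  rw [h0]
  conv_rhs => rw [List.filter_map, pv_sorted_map, List.map_map]
  rfl

lemma pv_cand_mem (ap : List (Int × Int)) (gtp : List (Int × Int)) (dt : Int) :
    ∀ c ∈ PySem.List.sorted
        ((ap.flatMap (fun p => gtp.map (fun q => (p, q, pvSqrdist p q)))).filter
          (fun c => decide (c.2.2 < dt))) (fun c => c.2.2) false,
      c.1 ∈ ap := by
  intro c hc
  rw [PySem.List.mem_sorted] at hc
  obtain ⟨p, hp, hq⟩ := List.mem_flatMap.mp (List.mem_filter.mp hc).1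
  obtain ⟨q, _, rfl⟩ := List.mem_map.mp hq
  exact hp

-- ===== VERDICT (by name: the statement is the Claim_ definition above) =====
theorem update_one_spec : Claim_equal_update_one := by
  intro gt predicted distance_threshold values _ hpre
  obtain ⟨hpred, hlen, -⟩ := hpre
  unfold Spec_update_one
  obtain ⟨a, b, c, t, rfl⟩ : ∃ a b c t, values = a :: b :: c :: t := by
    match values with
    | a :: b :: c :: t => exact ⟨a, b, c, t, rfl⟩
    | [] | [_] | [_, _] => simp at hlen
  obtain ⟨ap, hap⟩ : ∃ ap, predicted.getLast? = some ap := by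
    cases h : predicted.getLast? with
    | some ap => exact ⟨ap, rfl⟩
    | none => exact absurd (List.getLast?_eq_none_iff.mp h) hpred
  simp only [update_one, update_one_alt, hap]
  simp only [PySem.List.pyGetD_ofNat']
  rw [PySem.List.foldl_append_eq_flatMap, List.nil_append]
  set d := PySem.Dict.mk gt with hd
  set AG : List (Int × Int × Int) :=
    d.keys.flatMap (fun k => (d.getD k []).map (fun val => (val.1, val.2, k))) with hAG
  have hgp : d.keys.flatMap (fun k => (d.getD k []).map (fun v => (v.1, v.2)))
      = AG.map (fun q => (q.1, q.2.1)) := by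
    rw [hAG, List.map_flatMap]
    simp [List.map_map, Function.comp_def]
  rw [hgp]
  rw [pv_pairs_eq ap AG distance_threshold]
  set cand := PySem.List.sorted
      (((ap.flatMap (fun p => (AG.map (fun q => (q.1, q.2.1))).map
          (fun q => (p, q, pvSqrdist p q))))).filter
        (fun c => decide (c.2.2 < distance_threshold)))
      (fun c => c.2.2) false with hcand
  have htriv : cand.map pvPi = (cand.map pvPi).filter
      (fun x => !(PySem.Set.contains PySem.Set.empty x.1)
        && !(PySem.Set.contains PySem.Set.empty x.2)) := by
    simp [PySem.Set.empty, PySem.Set.contains]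
  rw [htriv]
  have hinv : ∀ x ∈ cand, x.1 ∉ (PySem.Set.empty : PySem.Set (Int × Int)) →
      x.2.1 ∉ (PySem.Set.empty : PySem.Set (Int × Int)) →
      x.1 ∈ PySem.Set.ofList ap := by
    intro x hx _ _
    exact (PySem.Set.mem_ofList ap x.1).mpr
      (pv_cand_mem ap (AG.map (fun q => (q.1, q.2.1))) distance_threshold x hx)
  obtain ⟨h1, h2⟩ := pv_main cand PySem.Set.empty PySem.Set.empty (PySem.Set.ofList ap)
    (((a :: b :: c :: t).set 2 ((a :: b :: c :: t).getD 2 0 + (AG.length : Int))).getD 0 0)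
    (PySem.Set.nodup_ofList ap) hinv
  set res := pvLoopA ((cand.map pvPi).filter
      (fun x => !(PySem.Set.contains PySem.Set.empty x.1)
        && !(PySem.Set.contains PySem.Set.empty x.2)))
    (PySem.Set.ofList ap)
    (((a :: b :: c :: t).set 2 ((a :: b :: c :: t).getD 2 0 + (AG.length : Int))).getD 0 0) with hres
  have e1 : (a :: b :: c :: t).set 2 ((a :: b :: c :: t).getD 2 0 + (AG.length : Int))
      = a :: b :: (c + (AG.length : Int)) :: t := rfl
  rw [e1] at h1 ⊢
  have e2 : (a :: b :: (c + (AG.length : Int)) :: t).getD 0 0 = a := rfl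
  rw [e2] at h1
  have e3 : ((a :: b :: (c + (AG.length : Int)) :: t).set 0 res.2) = res.2 :: b :: (c + (AG.length : Int)) :: t := rfl
  rw [e3]
  have e4 : (res.2 :: b :: (c + (AG.length : Int)) :: t).getD 1 0 = b := rfl
  rw [e4]
  have e5 : ((res.2 :: b :: (c + (AG.length : Int)) :: t).set 1 (b + PySem.Set.len res.1))
      = res.2 :: (b + PySem.Set.len res.1) :: (c + (AG.length : Int)) :: t := rfl
  rw [e5]
  -- B side
  have f1 : ((a :: b :: c :: t).set 0 ((a :: b :: c :: t).getD 0 0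
      + pvLoopB cand PySem.Set.empty PySem.Set.empty 0))
      = (a + pvLoopB cand PySem.Set.empty PySem.Set.empty 0) :: b :: c :: t := rfl
  rw [f1]
  have f2 : ((a + pvLoopB cand PySem.Set.empty PySem.Set.empty 0) :: b :: c :: t).getD 1 0 = b := rfl
  rw [f2]
  have f3 : ∀ y : Int, ((a + pvLoopB cand PySem.Set.empty PySem.Set.empty 0) :: b :: c :: t).set 1 y
      = (a + pvLoopB cand PySem.Set.empty PySem.Set.empty 0) :: y :: c :: t := fun _ => rfl
  rw [f3]
  have f4 : ∀ y z : Int, ((a + pvLoopB cand PySem.Set.empty PySem.Set.empty 0) :: y :: c :: t).set 2 z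
      = (a + pvLoopB cand PySem.Set.empty PySem.Set.empty 0) :: y :: z :: t := fun _ _ => rfl
  rw [f4]
  have f5 : ((a + pvLoopB cand PySem.Set.empty PySem.Set.empty 0) :: (b
      + (PySem.Set.len (PySem.Set.ofList ap) - pvLoopB cand PySem.Set.empty PySem.Set.empty 0)) :: c :: t).getD 2 0 = c := rfl
  rw [f5]
  have hlenmap : ((AG.map (fun q => (q.1, q.2.1))).length : Int) = (AG.length : Int) := by
    rw [List.length_map]
  rw [hlenmap]
  have hlen2 : PySem.Set.len res.1 = PySem.Set.len (PySem.Set.ofList ap)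
      - pvLoopB cand PySem.Set.empty PySem.Set.empty 0 := by
    simp only [PySem.Set.len]
    omega
  rw [h1, hlen2]
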